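-- pv_equiv track=rewrite | github.com/rangerdio/SoftUni | 1_filtering/new/wireshark_filter.py | wireshark_filtering
-- ===== SOURCE A (Python) =====
-- def transform_sip(sip_ids):
--     return ['(sip.Call-ID == "{}")'.format(sip_id) for sip_id in sip_ids]
--
-- def transform_csta(csta_ids):
--     return ['(xml.cdata == "FF0{}")'.format(csta_id[:-3]) for csta_id in csta_ids]
--
-- def transform_csta_2nd(csta_ids_2nd):
--     return ['(xml.cdata == "FF{}")'.format(csta_id[2:]) for csta_id in csta_ids_2nd]
--
-- def transform_mgcp_ids(mgcp_ids):
--     return ['(mgcp.transid == "{}")'.format(mgcp_id) for mgcp_id in mgcp_ids]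
--
-- def wireshark_filtering(raw_data):
--     wireshark_filter = '\n\n'
--
--     if not raw_data:
--         return "No valid IDs found to create Wireshark Filter."
--
--     raw_data_list = raw_data.replace(',', ' ').split()
--     sip_ids, csta_ids, csta_ids_2nd, mgcp_ids = [], [], [], []
--
--     for element in raw_data_list:
--         if element.isdigit() and len(element) == 7:
--             mgcp_ids.append(element)
--         elif '000000000' in element:
--             if element.endswith('-FF'):
--                 csta_ids.append(element)
--             elif element.startswith('0'):
--                 csta_ids_2nd.append(element)
--         else:
--             sip_ids.append(element)
--
--     filter_parts = []
--     if sip_ids: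
--         filter_parts.extend(transform_sip(sip_ids))
--     if csta_ids:
--         filter_parts.extend(transform_csta(csta_ids))
--     if csta_ids_2nd:
--         filter_parts.extend(transform_csta_2nd(csta_ids_2nd))
--     if mgcp_ids:
--         filter_parts.extend(transform_mgcp_ids(mgcp_ids))
--
--     wireshark_filter += "Wireshark Filter:\n" + ' or '.join(filter_parts)
--     return wireshark_filter
-- ===== SOURCE B (Python) =====
-- def _classify(element):
--     if element.isdigit() and len(element) == 7:
--         return (3, '(mgcp.transid == "{}")'.format(element))
--     if '000000000' in element:
--         if element.endswith('-FF'):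
--             return (1, '(xml.cdata == "FF0{}")'.format(element[:-3]))
--         if element.startswith('0'):
--             return (2, '(xml.cdata == "FF{}")'.format(element[2:]))
--         return None
--     return (0, '(sip.Call-ID == "{}")'.format(element))
--
-- def wireshark_filtering(raw_data):
--     if not raw_data:
--         return "No valid IDs found to create Wireshark Filter."
--     tagged = [t for t in map(_classify, raw_data.replace(',', ' ').split()) if t is not None]
--     tagged.sort(key=lambda t: t[0])
--     return '\n\nWireshark Filter:\n' + ' or '.join(s for _, s in tagged)
-- ===== Notes on version B (the rewrite author's own statement) =====
-- stated objective: alternative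
-- what changed: Replaces the four category lists and four separate transform comprehensions with a single pass that tags each token with (rank, formatted string) and a stable sort by rank before joining.
import Mathlib
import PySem

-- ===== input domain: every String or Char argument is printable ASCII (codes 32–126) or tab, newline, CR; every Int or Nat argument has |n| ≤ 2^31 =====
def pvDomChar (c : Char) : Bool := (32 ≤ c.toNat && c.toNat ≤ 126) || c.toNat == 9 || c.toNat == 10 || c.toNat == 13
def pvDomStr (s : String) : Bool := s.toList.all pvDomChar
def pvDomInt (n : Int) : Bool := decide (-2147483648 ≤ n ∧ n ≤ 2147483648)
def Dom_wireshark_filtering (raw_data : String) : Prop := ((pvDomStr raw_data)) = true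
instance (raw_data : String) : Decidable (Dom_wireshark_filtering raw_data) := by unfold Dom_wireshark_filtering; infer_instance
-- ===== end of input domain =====

-- B replaces A's four category lists and four transform passes by one tagged pass plus a stable sort by rank ('alternative' decomposition, same behaviour).


-- ===== PORT A =====
def transform_sip (sip_ids : List String) : List String :=
  sip_ids.map (fun sip_id => "(sip.Call-ID == \"" ++ sip_id ++ "\")")

def transform_csta (csta_ids : List String) : List String :=
  csta_ids.map (fun csta_id => "(xml.cdata == \"FF0" ++ PySem.Str.slice csta_id none (some (-3)) ++ "\")")

def transform_csta_2nd (csta_ids_2nd : List String) : List String :=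
  csta_ids_2nd.map (fun csta_id => "(xml.cdata == \"FF" ++ PySem.Str.slice csta_id (some 2) none ++ "\")")

def transform_mgcp_ids (mgcp_ids : List String) : List String :=
  mgcp_ids.map (fun mgcp_id => "(mgcp.transid == \"" ++ mgcp_id ++ "\")")

-- the body of A's classification loop (one step, state = the four lists)
def wsStep (st : List String × List String × List String × List String) (element : String) :
    List String × List String × List String × List String :=
  if PySem.Str.strIsdigit element && PySem.Str.len element == 7 then
    (st.1, st.2.1, st.2.2.1, st.2.2.2 ++ [element])
  else if PySem.Str.isIn "000000000" element then
    if PySem.Str.endswith element "-FF" then (st.1, st.2.1 ++ [element], st.2.2.1, st.2.2.2)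
    else if PySem.Str.startswith element "0" then (st.1, st.2.1, st.2.2.1 ++ [element], st.2.2.2)
    else st
  else (st.1 ++ [element], st.2.1, st.2.2.1, st.2.2.2)

def wireshark_filtering (raw_data : String) : String :=
  if raw_data = "" then "No valid IDs found to create Wireshark Filter."
  else
    let raw_data_list := PySem.Str.split₀ (PySem.Str.replace raw_data "," " ")
    let st := raw_data_list.foldl wsStep ([], [], [], [])
    let fp0 : List String := []
    let fp1 := if st.1.isEmpty then fp0 else fp0 ++ transform_sip st.1
    let fp2 := if st.2.1.isEmpty then fp1 else fp1 ++ transform_csta st.2.1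
    let fp3 := if st.2.2.1.isEmpty then fp2 else fp2 ++ transform_csta_2nd st.2.2.1
    let fp4 := if st.2.2.2.isEmpty then fp3 else fp3 ++ transform_mgcp_ids st.2.2.2
    "\n\n" ++ ("Wireshark Filter:\n" ++ PySem.Str.join " or " fp4)

-- ===== PORT B =====
-- classify one token: (category rank, formatted filter part), none = silently dropped
def wsClassify (element : String) : Option (Int × String) :=
  if PySem.Str.strIsdigit element && PySem.Str.len element == 7 then
    some (3, "(mgcp.transid == \"" ++ element ++ "\")")
  else if PySem.Str.isIn "000000000" element then
    if PySem.Str.endswith element "-FF" then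
      some (1, "(xml.cdata == \"FF0" ++ PySem.Str.slice element none (some (-3)) ++ "\")")
    else if PySem.Str.startswith element "0" then
      some (2, "(xml.cdata == \"FF" ++ PySem.Str.slice element (some 2) none ++ "\")")
    else none
  else some (0, "(sip.Call-ID == \"" ++ element ++ "\")")

def wireshark_filtering_alt (raw_data : String) : String :=
  if raw_data = "" then "No valid IDs found to create Wireshark Filter."
  else
    let tagged := (PySem.Str.split₀ (PySem.Str.replace raw_data "," " ")).filterMap wsClassify
    let sortedTagged := PySem.List.sorted tagged (fun t => t.1)
    "\n\nWireshark Filter:\n" ++ PySem.Str.join " or " (sortedTagged.map (fun t => t.2))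

-- ===== PRECONDITION & SPEC =====
def Spec_wireshark_filtering (raw_data : String) (out : String) : Prop := out = wireshark_filtering_alt raw_data
instance (raw_data : String) (out : String) : Decidable (Spec_wireshark_filtering raw_data out) := by unfold Spec_wireshark_filtering; infer_instance

-- ===== CLAIM (what is proved, stated in full; the proofs are below) =====
def Claim_equal_wireshark_filtering : Prop := ∀ (raw_data : String), Dom_wireshark_filtering raw_data → Spec_wireshark_filtering raw_data (wireshark_filtering raw_data)

-- ===== LEMMAS AND PROOFS =====

-- the four category predicates (the branch conditions of A's loop)
def pMgcp (e : String) : Bool := PySem.Str.strIsdigit e && PySem.Str.len e == 7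
def pCsta (e : String) : Bool := !pMgcp e && (PySem.Str.isIn "000000000" e && PySem.Str.endswith e "-FF")
def pCsta2 (e : String) : Bool := !pMgcp e && (PySem.Str.isIn "000000000" e && (!PySem.Str.endswith e "-FF" && PySem.Str.startswith e "0"))
def pSip (e : String) : Bool := !pMgcp e && !PySem.Str.isIn "000000000" e

theorem foldl_wsStep (toks : List String) :
    ∀ (a b c d : List String),
      toks.foldl wsStep (a, b, c, d) =
        (a ++ toks.filter pSip, b ++ toks.filter pCsta, c ++ toks.filter pCsta2, d ++ toks.filter pMgcp) := by
  induction toks with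
  | nil => intro a b c d; simp
  | cons x xs ih =>
    intro a b c d
    simp only [List.foldl_cons, List.filter_cons]
    cases hc1 : (PySem.Str.strIsdigit x && PySem.Str.len x == 7) with
    | true =>
      simp only [wsStep, hc1, reduceIte]
      rw [ih]
      simp only [pMgcp, pSip, pCsta, pCsta2, hc1, Bool.not_true, Bool.false_and, reduceIte,
        List.append_assoc, List.singleton_append]
      simp
    | false =>
      cases hc2 : PySem.Str.isIn "000000000" x with
      | true =>
        cases hc3 : PySem.Str.endswith x "-FF" with
        | true =>
          simp only [wsStep, hc1, hc2, hc3, reduceIte]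
          rw [ih]
          simp only [pMgcp, pSip, pCsta, pCsta2, hc1, hc2, hc3, Bool.not_false, Bool.not_true,
            Bool.true_and, Bool.and_true, Bool.true_and, Bool.false_and, Bool.and_false, reduceIte,
            List.append_assoc, List.singleton_append]
          simp
        | false =>
          cases hc4 : PySem.Str.startswith x "0" with
          | true =>
            simp only [wsStep, hc1, hc2, hc3, hc4, reduceIte]
            rw [ih]
            simp only [pMgcp, pSip, pCsta, pCsta2, hc1, hc2, hc3, hc4, Bool.not_false, Bool.not_true,
              Bool.true_and, Bool.and_true, Bool.false_and, Bool.and_false, reduceIte,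
              List.append_assoc, List.singleton_append]
            simp
          | false =>
            simp only [wsStep, hc1, hc2, hc3, hc4, reduceIte]
            rw [ih]
            simp only [pMgcp, pSip, pCsta, pCsta2, hc1, hc2, hc3, hc4, Bool.not_false, Bool.not_true,
              Bool.true_and, Bool.and_true, Bool.false_and, Bool.and_false, reduceIte]
            simp
      | false =>
        simp only [wsStep, hc1, hc2, reduceIte]
        rw [ih]
        simp only [pMgcp, pSip, pCsta, pCsta2, hc1, hc2, Bool.not_false, Bool.not_true,
          Bool.true_and, Bool.and_true, Bool.false_and, Bool.and_false, reduceIte,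
          List.append_assoc, List.singleton_append]
        simp

-- insertBy unfolding lemmas
theorem insertBy_cons_of_before {α : Type} (before : α → α → Bool) (x y : α) (ys : List α)
    (h : before x y = true) : PySem.List.insertBy before x (y :: ys) = x :: y :: ys := by
  simp [PySem.List.insertBy, h]

theorem insertBy_cons_of_not_before {α : Type} (before : α → α → Bool) (x y : α) (ys : List α)
    (h : before x y = false) : PySem.List.insertBy before x (y :: ys) = y :: PySem.List.insertBy before x ys := by
  simp [PySem.List.insertBy, h]

theorem insertBy_append_left {α : Type} (before : α → α → Bool) (x : α) (as bs : List α)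
    (h : ∀ a ∈ as, before x a = false) :
    PySem.List.insertBy before x (as ++ bs) = as ++ PySem.List.insertBy before x bs := by
  induction as with
  | nil => simp
  | cons a as ih =>
    rw [List.cons_append, insertBy_cons_of_not_before _ _ _ _ (h a (by simp)),
      ih (fun a ha => h a (by simp [ha])), List.cons_append]

theorem insertBy_all_before {α : Type} (before : α → α → Bool) (x : α) (bs : List α)
    (h : ∀ b ∈ bs, before x b = true) :
    PySem.List.insertBy before x bs = x :: bs := by
  cases bs with
  | nil => simp [PySem.List.insertBy]
  | cons b bs => rw [insertBy_cons_of_before _ _ _ _ (h b (by simp))]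

-- the stable sort of a rank-tagged list (ranks in {0,1,2,3}) is the rank-grouping
theorem foldl_insertBy_grouped (l : List (Int × String)) :
    ∀ (g0 g1 g2 g3 : List (Int × String)),
      (∀ t ∈ g0, t.1 = 0) → (∀ t ∈ g1, t.1 = 1) → (∀ t ∈ g2, t.1 = 2) → (∀ t ∈ g3, t.1 = 3) →
      (∀ t ∈ l, t.1 = 0 ∨ t.1 = 1 ∨ t.1 = 2 ∨ t.1 = 3) →
      l.foldl (fun acc x => PySem.List.insertBy (fun a b => decide ((a : Int × String).1 < b.1)) x acc)
        (g0 ++ g1 ++ g2 ++ g3) =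
      (g0 ++ l.filter (fun t => t.1 == 0)) ++ (g1 ++ l.filter (fun t => t.1 == 1)) ++
      (g2 ++ l.filter (fun t => t.1 == 2)) ++ (g3 ++ l.filter (fun t => t.1 == 3)) := by
  induction l with
  | nil => intro g0 g1 g2 g3 _ _ _ _ _; simp
  | cons x l ih =>
    intro g0 g1 g2 g3 h0 h1 h2 h3 hl
    simp only [List.foldl_cons]
    rcases hl x (by simp) with hx | hx | hx | hx
    · have hins : PySem.List.insertBy (fun a b => decide ((a : Int × String).1 < b.1)) x
          (g0 ++ g1 ++ g2 ++ g3) = (g0 ++ [x]) ++ g1 ++ g2 ++ g3 := by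
        rw [show g0 ++ g1 ++ g2 ++ g3 = g0 ++ (g1 ++ g2 ++ g3) by simp,
          insertBy_append_left _ _ _ _ (fun a ha => by simp [h0 a ha, hx]),
          insertBy_all_before _ _ _ (fun b hb => by
            simp only [List.mem_append] at hb
            rcases hb with (hb | hb) | hb
            · simp [h1 b hb, hx]
            · simp [h2 b hb, hx]
            · simp [h3 b hb, hx])]
        simp
      rw [hins, ih (g0 ++ [x]) g1 g2 g3
          (fun t ht => by
            rcases List.mem_append.mp ht with ht | ht
            · exact h0 t ht
            · simp at ht; simp [ht, hx])
          h1 h2 h3 (fun t ht => hl t (by simp [ht]))]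
      simp [List.filter_cons, hx]
    · have hins : PySem.List.insertBy (fun a b => decide ((a : Int × String).1 < b.1)) x
          (g0 ++ g1 ++ g2 ++ g3) = g0 ++ (g1 ++ [x]) ++ g2 ++ g3 := by
        rw [show g0 ++ g1 ++ g2 ++ g3 = (g0 ++ g1) ++ (g2 ++ g3) by simp,
          insertBy_append_left _ _ _ _ (fun a ha => by
            rcases List.mem_append.mp ha with ha | ha
            · simp [h0 a ha, hx]
            · simp [h1 a ha, hx]),
          insertBy_all_before _ _ _ (fun b hb => by
            rcases List.mem_append.mp hb with hb | hb
            · simp [h2 b hb, hx]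
            · simp [h3 b hb, hx])]
        simp
      rw [hins, ih g0 (g1 ++ [x]) g2 g3 h0
          (fun t ht => by
            rcases List.mem_append.mp ht with ht | ht
            · exact h1 t ht
            · simp at ht; simp [ht, hx])
          h2 h3 (fun t ht => hl t (by simp [ht]))]
      simp [List.filter_cons, hx]
    · have hins : PySem.List.insertBy (fun a b => decide ((a : Int × String).1 < b.1)) x
          (g0 ++ g1 ++ g2 ++ g3) = g0 ++ g1 ++ (g2 ++ [x]) ++ g3 := by
        rw [show g0 ++ g1 ++ g2 ++ g3 = (g0 ++ g1 ++ g2) ++ g3 by simp,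
          insertBy_append_left _ _ _ _ (fun a ha => by
            simp only [List.mem_append] at ha
            rcases ha with (ha | ha) | ha
            · simp [h0 a ha, hx]
            · simp [h1 a ha, hx]
            · simp [h2 a ha, hx]),
          insertBy_all_before _ _ _ (fun b hb => by simp [h3 b hb, hx])]
        simp
      rw [hins, ih g0 g1 (g2 ++ [x]) g3 h0 h1
          (fun t ht => by
            rcases List.mem_append.mp ht with ht | ht
            · exact h2 t ht
            · simp at ht; simp [ht, hx])
          h3 (fun t ht => hl t (by simp [ht]))]
      simp [List.filter_cons, hx]
    · have hins : PySem.List.insertBy (fun a b => decide ((a : Int × String).1 < b.1)) x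
          (g0 ++ g1 ++ g2 ++ g3) = g0 ++ g1 ++ g2 ++ (g3 ++ [x]) := by
        rw [show g0 ++ g1 ++ g2 ++ g3 = (g0 ++ g1 ++ g2 ++ g3) ++ [] by simp,
          insertBy_append_left _ _ _ _ (fun a ha => by
            simp only [List.mem_append] at ha
            rcases ha with ((ha | ha) | ha) | ha
            · simp [h0 a ha, hx]
            · simp [h1 a ha, hx]
            · simp [h2 a ha, hx]
            · simp [h3 a ha, hx]),
          insertBy_all_before _ _ _ (by simp)]
        simp
      rw [hins, ih g0 g1 g2 (g3 ++ [x]) h0 h1 h2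
          (fun t ht => by
            rcases List.mem_append.mp ht with ht | ht
            · exact h3 t ht
            · simp at ht; simp [ht, hx])
          (fun t ht => hl t (by simp [ht]))]
      simp [List.filter_cons, hx]

-- every tag wsClassify emits has rank 0..3
theorem wsClassify_rank (t : Int × String) (e : String) (h : wsClassify e = some t) :
    t.1 = 0 ∨ t.1 = 1 ∨ t.1 = 2 ∨ t.1 = 3 := by
  unfold wsClassify at h
  split_ifs at h <;> simp only [Option.some.injEq, reduceCtorEq] at h <;> subst h <;> simp

-- the rank-k slice of the tagged list is A's k-th category list, formatted
theorem filter_rank0 (toks : List String) :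
    (toks.filterMap wsClassify).filter (fun t => t.1 == 0) =
      (toks.filter pSip).map (fun e => ((0 : Int), "(sip.Call-ID == \"" ++ e ++ "\")")) := by
  induction toks with
  | nil => rfl
  | cons x xs ih =>
    simp only [List.filterMap_cons, List.filter_cons]
    cases hc1 : (PySem.Str.strIsdigit x && PySem.Str.len x == 7) with
    | true =>
      have hx : wsClassify x = some ((3 : Int), "(mgcp.transid == \"" ++ x ++ "\")") := by
        simp only [wsClassify, hc1, reduceIte]
      have hp : pSip x = false := by
        simp only [pSip, pMgcp, hc1, Bool.not_true, Bool.not_false, Bool.true_and, Bool.false_and, Bool.and_true, Bool.and_false]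
      rw [hx]
      simp [hp, ih]
    | false =>
      cases hc2 : PySem.Str.isIn "000000000" x with
      | true =>
        cases hc3 : PySem.Str.endswith x "-FF" with
        | true =>
          have hx : wsClassify x = some ((1 : Int), "(xml.cdata == \"FF0" ++ PySem.Str.slice x none (some (-3)) ++ "\")") := by
            simp only [wsClassify, hc1, hc2, hc3, reduceIte]
            simp
          have hp : pSip x = false := by
            simp only [pSip, pMgcp, hc1, hc2, hc3, Bool.not_true, Bool.not_false, Bool.true_and, Bool.false_and, Bool.and_true, Bool.and_false]
          rw [hx]
          simp [hp, ih]
        | false =>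
          cases hc4 : PySem.Str.startswith x "0" with
          | true =>
            have hx : wsClassify x = some ((2 : Int), "(xml.cdata == \"FF" ++ PySem.Str.slice x (some 2) none ++ "\")") := by
              simp only [wsClassify, hc1, hc2, hc3, hc4, reduceIte]
              simp
            have hp : pSip x = false := by
              simp only [pSip, pMgcp, hc1, hc2, hc3, hc4, Bool.not_true, Bool.not_false, Bool.true_and, Bool.false_and, Bool.and_true, Bool.and_false]
            rw [hx]
            simp [hp, ih]
          | false =>
            have hx : wsClassify x = none := by
              simp only [wsClassify, hc1, hc2, hc3, hc4, reduceIte]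
              simp
            have hp : pSip x = false := by
              simp only [pSip, pMgcp, hc1, hc2, hc3, hc4, Bool.not_true, Bool.not_false, Bool.true_and, Bool.false_and, Bool.and_true, Bool.and_false]
            rw [hx]
            simp [hp, ih]
      | false =>
        have hx : wsClassify x = some ((0 : Int), "(sip.Call-ID == \"" ++ x ++ "\")") := by
          simp only [wsClassify, hc1, hc2, reduceIte]
          simp
        have hp : pSip x = true := by
          simp only [pSip, pMgcp, hc1, hc2, Bool.not_true, Bool.not_false, Bool.true_and, Bool.false_and, Bool.and_true, Bool.and_false]
        rw [hx]
        simp [hp, ih]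

theorem filter_rank1 (toks : List String) :
    (toks.filterMap wsClassify).filter (fun t => t.1 == 1) =
      (toks.filter pCsta).map (fun e => ((1 : Int), "(xml.cdata == \"FF0" ++ PySem.Str.slice e none (some (-3)) ++ "\")")) := by
  induction toks with
  | nil => rfl
  | cons x xs ih =>
    simp only [List.filterMap_cons, List.filter_cons]
    cases hc1 : (PySem.Str.strIsdigit x && PySem.Str.len x == 7) with
    | true =>
      have hx : wsClassify x = some ((3 : Int), "(mgcp.transid == \"" ++ x ++ "\")") := by
        simp only [wsClassify, hc1, reduceIte]
      have hp : pCsta x = false := by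
        simp only [pCsta, pMgcp, hc1, Bool.not_true, Bool.not_false, Bool.true_and, Bool.false_and, Bool.and_true, Bool.and_false]
      rw [hx]
      simp [hp, ih]
    | false =>
      cases hc2 : PySem.Str.isIn "000000000" x with
      | true =>
        cases hc3 : PySem.Str.endswith x "-FF" with
        | true =>
          have hx : wsClassify x = some ((1 : Int), "(xml.cdata == \"FF0" ++ PySem.Str.slice x none (some (-3)) ++ "\")") := by
            simp only [wsClassify, hc1, hc2, hc3, reduceIte]
            simp
          have hp : pCsta x = true := by
            simp only [pCsta, pMgcp, hc1, hc2, hc3, Bool.not_true, Bool.not_false, Bool.true_and, Bool.false_and, Bool.and_true, Bool.and_false]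
          rw [hx]
          simp [hp, ih]
        | false =>
          cases hc4 : PySem.Str.startswith x "0" with
          | true =>
            have hx : wsClassify x = some ((2 : Int), "(xml.cdata == \"FF" ++ PySem.Str.slice x (some 2) none ++ "\")") := by
              simp only [wsClassify, hc1, hc2, hc3, hc4, reduceIte]
              simp
            have hp : pCsta x = false := by
              simp only [pCsta, pMgcp, hc1, hc2, hc3, hc4, Bool.not_true, Bool.not_false, Bool.true_and, Bool.false_and, Bool.and_true, Bool.and_false]
            rw [hx]
            simp [hp, ih]
          | false =>
            have hx : wsClassify x = none := by
              simp only [wsClassify, hc1, hc2, hc3, hc4, reduceIte]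
              simp
            have hp : pCsta x = false := by
              simp only [pCsta, pMgcp, hc1, hc2, hc3, hc4, Bool.not_true, Bool.not_false, Bool.true_and, Bool.false_and, Bool.and_true, Bool.and_false]
            rw [hx]
            simp [hp, ih]
      | false =>
        have hx : wsClassify x = some ((0 : Int), "(sip.Call-ID == \"" ++ x ++ "\")") := by
          simp only [wsClassify, hc1, hc2, reduceIte]
          simp
        have hp : pCsta x = false := by
          simp only [pCsta, pMgcp, hc1, hc2, Bool.not_true, Bool.not_false, Bool.true_and, Bool.false_and, Bool.and_true, Bool.and_false]
        rw [hx]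
        simp [hp, ih]

theorem filter_rank2 (toks : List String) :
    (toks.filterMap wsClassify).filter (fun t => t.1 == 2) =
      (toks.filter pCsta2).map (fun e => ((2 : Int), "(xml.cdata == \"FF" ++ PySem.Str.slice e (some 2) none ++ "\")")) := by
  induction toks with
  | nil => rfl
  | cons x xs ih =>
    simp only [List.filterMap_cons, List.filter_cons]
    cases hc1 : (PySem.Str.strIsdigit x && PySem.Str.len x == 7) with
    | true =>
      have hx : wsClassify x = some ((3 : Int), "(mgcp.transid == \"" ++ x ++ "\")") := by
        simp only [wsClassify, hc1, reduceIte]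
      have hp : pCsta2 x = false := by
        simp only [pCsta2, pMgcp, hc1, Bool.not_true, Bool.not_false, Bool.true_and, Bool.false_and, Bool.and_true, Bool.and_false]
      rw [hx]
      simp [hp, ih]
    | false =>
      cases hc2 : PySem.Str.isIn "000000000" x with
      | true =>
        cases hc3 : PySem.Str.endswith x "-FF" with
        | true =>
          have hx : wsClassify x = some ((1 : Int), "(xml.cdata == \"FF0" ++ PySem.Str.slice x none (some (-3)) ++ "\")") := by
            simp only [wsClassify, hc1, hc2, hc3, reduceIte]
            simp
          have hp : pCsta2 x = false := by
            simp only [pCsta2, pMgcp, hc1, hc2, hc3, Bool.not_true, Bool.not_false, Bool.true_and, Bool.false_and, Bool.and_true, Bool.and_false]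
          rw [hx]
          simp [hp, ih]
        | false =>
          cases hc4 : PySem.Str.startswith x "0" with
          | true =>
            have hx : wsClassify x = some ((2 : Int), "(xml.cdata == \"FF" ++ PySem.Str.slice x (some 2) none ++ "\")") := by
              simp only [wsClassify, hc1, hc2, hc3, hc4, reduceIte]
              simp
            have hp : pCsta2 x = true := by
              simp only [pCsta2, pMgcp, hc1, hc2, hc3, hc4, Bool.not_true, Bool.not_false, Bool.true_and, Bool.false_and, Bool.and_true, Bool.and_false]
            rw [hx]
            simp [hp, ih]
          | false =>
            have hx : wsClassify x = none := by
              simp only [wsClassify, hc1, hc2, hc3, hc4, reduceIte]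
              simp
            have hp : pCsta2 x = false := by
              simp only [pCsta2, pMgcp, hc1, hc2, hc3, hc4, Bool.not_true, Bool.not_false, Bool.true_and, Bool.false_and, Bool.and_true, Bool.and_false]
            rw [hx]
            simp [hp, ih]
      | false =>
        have hx : wsClassify x = some ((0 : Int), "(sip.Call-ID == \"" ++ x ++ "\")") := by
          simp only [wsClassify, hc1, hc2, reduceIte]
          simp
        have hp : pCsta2 x = false := by
          simp only [pCsta2, pMgcp, hc1, hc2, Bool.not_true, Bool.not_false, Bool.true_and, Bool.false_and, Bool.and_true, Bool.and_false]
        rw [hx]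
        simp [hp, ih]

theorem filter_rank3 (toks : List String) :
    (toks.filterMap wsClassify).filter (fun t => t.1 == 3) =
      (toks.filter pMgcp).map (fun e => ((3 : Int), "(mgcp.transid == \"" ++ e ++ "\")")) := by
  induction toks with
  | nil => rfl
  | cons x xs ih =>
    simp only [List.filterMap_cons, List.filter_cons]
    cases hc1 : (PySem.Str.strIsdigit x && PySem.Str.len x == 7) with
    | true =>
      have hx : wsClassify x = some ((3 : Int), "(mgcp.transid == \"" ++ x ++ "\")") := by
        simp only [wsClassify, hc1, reduceIte]
      have hp : pMgcp x = true := by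
        simp only [pMgcp, hc1, Bool.not_true, Bool.not_false, Bool.true_and, Bool.false_and, Bool.and_true, Bool.and_false]
      rw [hx]
      simp [hp, ih]
    | false =>
      cases hc2 : PySem.Str.isIn "000000000" x with
      | true =>
        cases hc3 : PySem.Str.endswith x "-FF" with
        | true =>
          have hx : wsClassify x = some ((1 : Int), "(xml.cdata == \"FF0" ++ PySem.Str.slice x none (some (-3)) ++ "\")") := by
            simp only [wsClassify, hc1, hc2, hc3, reduceIte]
            simp
          have hp : pMgcp x = false := by
            simp only [pMgcp, hc1, hc2, hc3, Bool.not_true, Bool.not_false, Bool.true_and, Bool.false_and, Bool.and_true, Bool.and_false]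
          rw [hx]
          simp [hp, ih]
        | false =>
          cases hc4 : PySem.Str.startswith x "0" with
          | true =>
            have hx : wsClassify x = some ((2 : Int), "(xml.cdata == \"FF" ++ PySem.Str.slice x (some 2) none ++ "\")") := by
              simp only [wsClassify, hc1, hc2, hc3, hc4, reduceIte]
              simp
            have hp : pMgcp x = false := by
              simp only [pMgcp, hc1, hc2, hc3, hc4, Bool.not_true, Bool.not_false, Bool.true_and, Bool.false_and, Bool.and_true, Bool.and_false]
            rw [hx]
            simp [hp, ih]
          | false =>
            have hx : wsClassify x = none := by
              simp only [wsClassify, hc1, hc2, hc3, hc4, reduceIte]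
              simp
            have hp : pMgcp x = false := by
              simp only [pMgcp, hc1, hc2, hc3, hc4, Bool.not_true, Bool.not_false, Bool.true_and, Bool.false_and, Bool.and_true, Bool.and_false]
            rw [hx]
            simp [hp, ih]
      | false =>
        have hx : wsClassify x = some ((0 : Int), "(sip.Call-ID == \"" ++ x ++ "\")") := by
          simp only [wsClassify, hc1, hc2, reduceIte]
          simp
        have hp : pMgcp x = false := by
          simp only [pMgcp, hc1, hc2, Bool.not_true, Bool.not_false, Bool.true_and, Bool.false_and, Bool.and_true, Bool.and_false]
        rw [hx]
        simp [hp, ih]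

-- A's 'if list nonempty then extend' is an unconditional extend (extend by [] is a no-op)
theorem if_isEmpty_append (parts : List String) (l : List String) (f : String → String) :
    (if l.isEmpty then parts else parts ++ l.map f) = parts ++ l.map f := by
  cases l <;> simp

theorem if_isEmpty_map (l : List String) (f : String → String) :
    (if l.isEmpty then ([] : List String) else l.map f) = l.map f := by
  cases l <;> simp

-- ===== VERDICT (by name: the statement is the Claim_ definition above) =====
theorem wireshark_filtering_spec : Claim_equal_wireshark_filtering := by
  intro raw_data _
  unfold Spec_wireshark_filtering wireshark_filtering wireshark_filtering_alt
  by_cases h : raw_data = ""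
  · simp [h]
  · simp only [h, reduceIte, if_neg h]
    generalize PySem.Str.split₀ (PySem.Str.replace raw_data "," " ") = toks
    rw [foldl_wsStep toks [] [] [] []]
    rw [PySem.List.sorted_eq_foldl_insertBy]
    have hg := foldl_insertBy_grouped (toks.filterMap wsClassify) [] [] [] []
      (by simp) (by simp) (by simp) (by simp)
      (fun t ht => by
        rcases List.mem_filterMap.mp ht with ⟨e, _, he⟩
        exact wsClassify_rank t e he)
    simp only [List.nil_append, List.append_nil] at hg
    rw [hg, filter_rank0, filter_rank1, filter_rank2, filter_rank3]
    simp only [transform_sip, transform_csta, transform_csta_2nd, transform_mgcp_ids,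
      if_isEmpty_append, if_isEmpty_map, List.nil_append, List.map_append, List.map_map]
    rw [← String.append_assoc]
    congr 1
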